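-- pv_equiv track=rewrite | github.com/Ucnt/aws-s3-data-finder | module/run_bucket.py | suspicious_backup
-- ===== SOURCE A (Python) =====
-- def suspicious_backup(key_lower):
--     #Any database file
--     if any([True for extension in [".sql", ".mysql", ".mongodb", ".mariadb", ".mdb", ".dump"] if extension in key_lower]):
--         return True
--
--     # Virtual drive backup
--     if any([True for extension in [".vmdk", ".vbox", ".vhd", ".vdi", ".hdd"] if extension in key_lower]):
--         return True
--
--     #Compressed file
--     if any([True for extension in [".gz", ".tar", ".zip", ".7z"] if extension in key_lower]):
--         return True
--
--     #Email backup
--     if any([True for extension in [".pst", ] if extension in key_lower]):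
--         return True
--
--     #Not a suspicious DB backup
--     return False
-- ===== SOURCE B (Python) =====
-- _EXTS = (".sql", ".mysql", ".mongodb", ".mariadb", ".mdb", ".dump",
--          ".vmdk", ".vbox", ".vhd", ".vdi", ".hdd",
--          ".gz", ".tar", ".zip", ".7z", ".pst")
--
--
-- def suspicious_backup(key_lower):
--     # single left-to-right scan: only at a '.' try to match any extension
--     for i, c in enumerate(key_lower):
--         if c == '.' and key_lower.startswith(_EXTS, i):
--             return True
--     return False
-- ===== Notes on version B (the rewrite author's own statement) =====
-- stated objective: idiomatic
-- what changed: Replaces four separate any-list-comprehension substring scans (one full scan of the key per extension) by one left-to-right scan of the key that, at each '.', tests all 16 extensions at once via str.startswith with a tuple.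
import Mathlib
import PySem

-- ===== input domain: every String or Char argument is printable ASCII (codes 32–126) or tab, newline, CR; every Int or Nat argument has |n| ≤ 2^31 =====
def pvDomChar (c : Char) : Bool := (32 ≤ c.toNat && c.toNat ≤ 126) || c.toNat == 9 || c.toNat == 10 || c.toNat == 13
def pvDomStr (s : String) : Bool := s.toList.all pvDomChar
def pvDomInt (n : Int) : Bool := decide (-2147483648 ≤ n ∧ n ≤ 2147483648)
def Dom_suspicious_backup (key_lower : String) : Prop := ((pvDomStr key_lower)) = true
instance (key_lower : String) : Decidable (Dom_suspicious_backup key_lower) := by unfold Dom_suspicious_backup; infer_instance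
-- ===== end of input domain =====

-- B replaces A's four per-extension substring scans by one left-to-right scan of the
-- key that only tries the 16 extensions as prefixes at each '.' (objective: idiomatic).

-- ===== PORT A =====
-- A: four `any([True for extension in [...] if extension in key_lower])` checks in order.
def suspicious_backup (key_lower : String) : Bool :=
  if ((([".sql", ".mysql", ".mongodb", ".mariadb", ".mdb", ".dump"].filter
        (fun extension => PySem.Str.isIn extension key_lower)).map (fun _ => true)).any id) then
    true
  else if ((([".vmdk", ".vbox", ".vhd", ".vdi", ".hdd"].filter
        (fun extension => PySem.Str.isIn extension key_lower)).map (fun _ => true)).any id) then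
    true
  else if ((([".gz", ".tar", ".zip", ".7z"].filter
        (fun extension => PySem.Str.isIn extension key_lower)).map (fun _ => true)).any id) then
    true
  else if ((([".pst"].filter
        (fun extension => PySem.Str.isIn extension key_lower)).map (fun _ => true)).any id) then
    true
  else
    false

-- ===== PORT B =====
-- the tuple _EXTS of Source B
def pvExts : List String :=
  [".sql", ".mysql", ".mongodb", ".mariadb", ".mdb", ".dump",
   ".vmdk", ".vbox", ".vhd", ".vdi", ".hdd",
   ".gz", ".tar", ".zip", ".7z", ".pst"]

-- Source B's loop: at index i with character c, `c == '.' and key_lower.startswith(_EXTS, i)`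
def pvScan : List Char → Bool
  | [] => false
  | c :: rest =>
      (c == '.' && pvExts.any (fun e => e.toList.isPrefixOf (c :: rest))) || pvScan rest

def suspicious_backup_alt (key_lower : String) : Bool :=
  pvScan key_lower.toList

-- ===== PRECONDITION & SPEC =====
def Spec_suspicious_backup (key_lower : String) (out : Bool) : Prop := out = suspicious_backup_alt key_lower
instance (key_lower : String) (out : Bool) : Decidable (Spec_suspicious_backup key_lower out) := by unfold Spec_suspicious_backup; infer_instance

-- ===== CLAIM (what is proved, stated in full; the proofs are below) =====
def Claim_equal_suspicious_backup : Prop := ∀ (key_lower : String), Dom_suspicious_backup key_lower → Spec_suspicious_backup key_lower (suspicious_backup key_lower)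

-- ===== LEMMAS AND PROOFS =====

-- every extension starts with '.'
theorem pvExts_head : ∀ e ∈ pvExts, e.toList.head? = some '.' := by decide

theorem pvFilterAny {α : Type} (p : α → Bool) (L : List α) :
    ((L.filter p).map (fun _ => true)).any id = L.any p := by
  induction L with
  | nil => rfl
  | cons a l ih =>
      rw [List.filter_cons, List.any_cons]
      by_cases h : p a = true
      · simp [h]
      · have hf : p a = false := eq_false_of_ne_true h
        rw [if_neg (by simp [hf]), ih, hf, Bool.false_or]

theorem pvScan_iff (s : List Char) :
    pvScan s = true ↔ ∃ e ∈ pvExts, e.toList <:+: s := by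
  induction s with
  | nil =>
      simp only [pvScan]
      constructor
      · intro h; exact absurd h (by decide)
      · rintro ⟨e, he, hinf⟩
        have hnil := List.eq_nil_of_infix_nil hinf
        have := pvExts_head e he
        rw [hnil] at this
        simp at this
  | cons c rest ih =>
      simp only [pvScan, Bool.or_eq_true, Bool.and_eq_true, List.any_eq_true, ih,
        beq_iff_eq, List.isPrefixOf_iff_prefix]
      constructor
      · rintro (⟨hc, e, he, hpre⟩ | ⟨e, he, hinf⟩)
        · exact ⟨e, he, hpre.isInfix⟩
        · exact ⟨e, he, List.infix_cons_iff.mpr (Or.inr hinf)⟩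
      · rintro ⟨e, he, hinf⟩
        rcases List.infix_cons_iff.mp hinf with hpre | hinf'
        · have hhead := pvExts_head e he
          have hc : c = '.' := by
            rcases hpre with ⟨u, hu⟩
            have h1 := congrArg List.head? hu
            rw [List.head?_append] at h1
            rw [hhead] at h1
            simp at h1
            exact h1.symm
          exact Or.inl ⟨hc, e, he, hpre⟩
        · exact Or.inr ⟨e, he, hinf'⟩

theorem pvA_eq (k : String) :
    suspicious_backup k = pvExts.any (fun e => PySem.Str.isIn e k) := by
  unfold suspicious_backup pvExts
  simp only [pvFilterAny, List.any_cons, List.any_nil, Bool.or_false]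
  split_ifs with h1 h2 h3 h4 <;> simp_all <;> tauto

-- ===== VERDICT (by name: the statement is the Claim_ definition above) =====
theorem suspicious_backup_spec : Claim_equal_suspicious_backup := by
  intro k _
  unfold Spec_suspicious_backup suspicious_backup_alt
  rw [pvA_eq, Bool.eq_iff_iff, List.any_eq_true, pvScan_iff]
  exact exists_congr fun e => and_congr_right fun _ => PySem.Str.isIn_iff_infix e k
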